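-- pv_equiv track=rewrite | github.com/sangho0407/Pre_coding_test | 2.Programmers/Lv2/더맵게.py | solution
-- ===== SOURCE A (Python) =====
-- import heapq
--
-- def solution(scoville, K):
--     # scoville 리스트를 최소 힙으로 변환
--     heapq.heapify(scoville)
--     # 섞은 횟수를 저장할 변수 초기화
--     answer = 0
--
--     # 힙의 크기가 1보다 크고, 힙의 최소값이 K 미만인 동안 반복
--     while len(scoville) > 1 and scoville[0] < K:
--         # 가장 맵지 않은 음식과 두 번째로 맵지 않은 음식을 가져옴
--         least_spicy = heapq.heappop(scoville)
--         second_least_spicy = heapq.heappop(scoville)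
--         # 두 음식을 섞어 새로운 음식 생성
--         mixed_spicy = least_spicy + (second_least_spicy * 2)
--         # 새로운 음식을 힙에 추가
--         heapq.heappush(scoville, mixed_spicy)
--         # 섞은 횟수 증가
--         answer += 1
--
--     # 모든 음식의 스코빌 지수가 K 이상이면 섞은 횟수 반환, 그렇지 않으면 -1 반환
--     return answer if scoville[0] >= K else -1
-- ===== SOURCE B (Python) =====
-- def _insert_sorted(s, x):
--     i = 0
--     while i < len(s) and s[i] <= x:
--         i += 1
--     s.insert(i, x)
--
-- def solution(scoville, K):
--     s = sorted(scoville)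
--     answer = 0
--     while len(s) > 1 and s[0] < K:
--         least = s.pop(0)
--         second = s.pop(0)
--         _insert_sorted(s, least + 2 * second)
--         answer += 1
--     return answer if s[0] >= K else -1
-- ===== Notes on version B (the rewrite author's own statement) =====
-- stated objective: alternative
-- what changed: Replaces the binary min-heap with a sorted list: sort once, repeatedly pop the two smallest from the front and linearly insert the mix back at its sorted position (no heap operations). A mutates scoville in place; B does not, so the equivalence is about the return value only.
import Mathlib
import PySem

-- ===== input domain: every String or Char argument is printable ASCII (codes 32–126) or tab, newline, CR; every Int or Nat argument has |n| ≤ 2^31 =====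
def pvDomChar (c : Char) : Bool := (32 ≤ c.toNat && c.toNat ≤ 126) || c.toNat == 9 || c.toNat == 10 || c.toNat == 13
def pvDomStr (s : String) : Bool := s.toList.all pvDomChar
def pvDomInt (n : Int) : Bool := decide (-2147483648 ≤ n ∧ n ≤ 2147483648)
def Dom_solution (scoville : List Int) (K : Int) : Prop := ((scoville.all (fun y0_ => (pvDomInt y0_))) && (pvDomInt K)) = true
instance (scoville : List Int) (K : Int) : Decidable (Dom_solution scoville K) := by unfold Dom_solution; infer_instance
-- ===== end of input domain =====

-- B replaces A's heap with a sorted list (linear re-insertion of each mix); same return value.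
-- A mutates `scoville` in place (heapify); the equivalence proved here is about the RETURN value only.

-- ===== PORT A =====
-- heapq.heapify/heappop/heappush are modeled by operations on a list whose head is a
-- minimum — the only property of the heap that A's return value observes; the port is
-- exact on the return value (the heap's internal element order is unobservable in it).
def heapifyM (l : List Int) : List Int :=
  match PySem.List.min? l (fun x => x) with
  | none => []
  | some m => m :: l.erase m

def heappop (l : List Int) : Int × List Int :=
  match l with
  | [] => (0, [])           -- Python raises IndexError here; unreachable under A's guards
  | a :: t => (a, heapifyM t)

def heappush (x : Int) (l : List Int) : List Int :=
  match l with
  | [] => [x]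
  | a :: t => if x < a then x :: a :: t else a :: x :: t

-- length lemmas the loop's termination argument needs
theorem heapifyM_length (l : List Int) : (heapifyM l).length = l.length := by
  unfold heapifyM
  cases hm : PySem.List.min? l (fun x => x) with
  | none => simp [(PySem.List.min?_eq_none_iff _ _).mp hm]
  | some m =>
    have hmem := PySem.List.min?_mem hm
    have hp : 0 < l.length := List.length_pos_of_mem hmem
    simp [List.length_erase_of_mem hmem]
    omega

theorem heappop_length (l : List Int) (h : 0 < l.length) :
    ((heappop l).2).length = l.length - 1 := by
  match l with
  | [] => simp at h
  | a :: t => simp [heappop, heapifyM_length]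

theorem heappush_length (x : Int) (l : List Int) : (heappush x l).length = l.length + 1 := by
  match l with
  | [] => simp [heappush]
  | a :: t => simp only [heappush]; split <;> simp

def heapLoop (K : Int) (h : List Int) (ans : Int) : Int :=
  if hc : 1 < h.length ∧ (PySem.List.pyGet? h 0).getD 0 < K then
    let p1 := heappop h
    let p2 := heappop p1.2
    heapLoop K (heappush (p1.1 + 2 * p2.1) p2.2) (ans + 1)
  else
    match PySem.List.pyGet? h 0 with
    | some v => if v ≥ K then ans else -1
    | none => -1                                   -- Python raises IndexError (empty list)
termination_by h.length
decreasing_by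
  obtain ⟨hl, -⟩ := hc
  have h1 : 0 < h.length := by omega
  have h2 := heappop_length h h1
  have h3 : 0 < ((heappop h).2).length := by omega
  have h4 := heappop_length _ h3
  simp only [heappush_length, h4, h2]
  omega

def solution (scoville : List Int) (K : Int) : Int :=
  heapLoop K (heapifyM scoville) 0

-- ===== PORT B =====
-- _insert_sorted: linear scan past all elements ≤ x, insert x there.
def insertSorted (x : Int) : List Int → List Int
  | [] => [x]
  | a :: t => if a ≤ x then a :: insertSorted x t else x :: a :: t

theorem insertSorted_length (x : Int) (l : List Int) :
    (insertSorted x l).length = l.length + 1 := by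
  induction l with
  | nil => simp [insertSorted]
  | cons a t ih => simp only [insertSorted]; split <;> simp [ih]

def sortLoop (K : Int) (s : List Int) (ans : Int) : Int :=
  if hc : 1 < s.length ∧ (PySem.List.pyGet? s 0).getD 0 < K then
    match s with
    | least :: second :: t => sortLoop K (insertSorted (least + 2 * second) t) (ans + 1)
    | _ => 0                                       -- unreachable: length > 1
  else
    match PySem.List.pyGet? s 0 with
    | some v => if v ≥ K then ans else -1
    | none => -1                                   -- Python raises IndexError (empty list)
termination_by s.length
decreasing_by simp [insertSorted_length]

def solution_alt (scoville : List Int) (K : Int) : Int :=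
  sortLoop K (PySem.List.sorted scoville (fun x => x)) 0

-- ===== PRECONDITION & SPEC =====
-- Pre_ excludes only the empty list, on which the Python A raises IndexError (scoville[0]).
def Pre_solution (scoville : List Int) (_K : Int) : Prop := scoville ≠ []
instance (scoville : List Int) (K : Int) : Decidable (Pre_solution scoville K) := by
  unfold Pre_solution; infer_instance
def pvWitness_solution : List Int × Int := ([1, 2, 3, 9, 10, 12], 7)

def Spec_solution (scoville : List Int) (K : Int) (out : Int) : Prop := out = solution_alt scoville K
instance (scoville : List Int) (K : Int) (out : Int) : Decidable (Spec_solution scoville K out) := by unfold Spec_solution; infer_instance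

-- ===== CLAIM (what is proved, stated in full; the proofs are below) =====
def Claim_equal_solution : Prop := ∀ (scoville : List Int) (K : Int), Dom_solution scoville K → Pre_solution scoville K → Spec_solution scoville K (solution scoville K)

-- ===== LEMMAS AND PROOFS =====

-- "the head (if any) is a minimum of the list" — the invariant of A's heap model
def MinAtFront (l : List Int) : Prop := ∀ a ∈ l.head?, ∀ y ∈ l, a ≤ y

theorem heappop_cons (a : Int) (t : List Int) : heappop (a :: t) = (a, heapifyM t) := rfl

theorem heapifyM_perm (l : List Int) : (heapifyM l).Perm l := by
  unfold heapifyM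
  cases hm : PySem.List.min? l (fun x => x) with
  | none => simp [(PySem.List.min?_eq_none_iff _ _).mp hm]
  | some m => exact (List.perm_cons_erase (PySem.List.min?_mem hm)).symm

theorem heapifyM_minAtFront (l : List Int) : MinAtFront (heapifyM l) := by
  cases hm : PySem.List.min? l (fun x => x) with
  | none => intro a ha; simp [heapifyM, hm] at ha
  | some m =>
    intro a ha y hy
    simp [heapifyM, hm] at ha hy
    subst ha
    have hmin := PySem.List.min?_isMin hm
    rcases hy with h1 | h1
    · omega
    · exact hmin y (List.mem_of_mem_erase h1)

theorem heappush_perm (x : Int) (l : List Int) : (heappush x l).Perm (x :: l) := by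
  match l with
  | [] => simp [heappush]
  | a :: t =>
    simp only [heappush]
    split
    · exact List.Perm.refl _
    · exact List.Perm.swap x a t

theorem heappush_minAtFront (x : Int) (l : List Int) (h : MinAtFront l) :
    MinAtFront (heappush x l) := by
  match l with
  | [] =>
    intro c hc y hy
    simp [heappush] at hc hy
    omega
  | a :: t =>
    have ha : ∀ y ∈ a :: t, a ≤ y := h a (by simp)
    simp only [heappush]
    split
    · rename_i hxa
      intro c hc y hy
      simp at hc; subst hc
      rcases List.mem_cons.mp hy with h1 | h1
      · omega
      · have := ha y h1; omega
    · rename_i hxa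
      intro c hc y hy
      simp at hc; subst hc
      rcases List.mem_cons.mp hy with h1 | h1
      · omega
      rcases List.mem_cons.mp h1 with h2 | h2
      · omega
      · exact ha y (List.mem_cons_of_mem _ h2)

theorem insertSorted_perm (x : Int) (l : List Int) : (insertSorted x l).Perm (x :: l) := by
  induction l with
  | nil => simp [insertSorted]
  | cons a t ih =>
    simp only [insertSorted]
    split
    · exact (ih.cons a).trans (List.Perm.swap x a t)
    · exact List.Perm.refl _

theorem insertSorted_sorted (x : Int) (l : List Int) (h : l.Pairwise (· ≤ ·)) :
    (insertSorted x l).Pairwise (· ≤ ·) := by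
  induction l with
  | nil => simp [insertSorted]
  | cons a t ih =>
    rw [List.pairwise_cons] at h
    obtain ⟨ha, ht⟩ := h
    simp only [insertSorted]
    split
    · rename_i hax
      rw [List.pairwise_cons]
      refine ⟨?_, ih ht⟩
      intro b hb
      rcases List.mem_cons.mp ((insertSorted_perm x t).mem_iff.mp hb) with h1 | h1
      · omega
      · exact ha b h1
    · rename_i hax
      rw [List.pairwise_cons]
      constructor
      · intro b hb
        rcases List.mem_cons.mp hb with h1 | h1
        · omega
        · have := ha b h1; omega
      · exact List.pairwise_cons.mpr ⟨ha, ht⟩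

-- two permuted lists whose fronts are both minima have equal fronts
theorem front_eq_of_perm (x a : Int) (h' s' : List Int)
    (hp : (x :: h').Perm (a :: s'))
    (hx : ∀ y ∈ x :: h', x ≤ y) (ha : ∀ y ∈ a :: s', a ≤ y) : x = a := by
  have h1 := ha x (hp.mem_iff.mp (by simp))
  have h2 := hx a (hp.mem_iff.mpr (by simp))
  omega

-- main bridge: A's heap loop = B's sorted-list loop on permuted states
theorem loop_eq (n : ℕ) : ∀ (K : Int) (h s : List Int) (ans : Int),
    h.length = n → h.Perm s → MinAtFront h → s.Pairwise (· ≤ ·) →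
    heapLoop K h ans = sortLoop K s ans := by
  induction n with
  | zero =>
    intro K h s ans hn hp _ _
    have hh : h = [] := List.length_eq_zero_iff.mp hn
    subst hh
    have hs : s = [] := hp.symm.eq_nil
    subst hs
    rw [heapLoop, sortLoop]
    simp [PySem.List.pyGet?_zero]
  | succ k ih =>
    intro K h s ans hn hp hmf hsort
    cases h with
    | nil => simp at hn
    | cons x h' =>
    cases s with
    | nil => exact absurd hp.eq_nil (by simp)
    | cons a s' =>
      have hxa : x = a := by
        refine front_eq_of_perm x a h' s' hp ?_ ?_
        · exact hmf x (by simp)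
        · intro y hy
          rcases List.mem_cons.mp hy with h1 | h1
          · omega
          · exact (List.pairwise_cons.mp hsort).1 y h1
      subst hxa
      have hp' : h'.Perm s' := hp.cons_inv
      rw [heapLoop, sortLoop]
      by_cases hc : 1 < (x :: h').length ∧ (PySem.List.pyGet? (x :: h') 0).getD 0 < K
      · have hcs : 1 < (x :: s').length ∧ (PySem.List.pyGet? (x :: s') 0).getD 0 < K := by
          simpa [PySem.List.pyGet?_zero_cons, hp'.length_eq] using hc
        rw [dif_pos hc, dif_pos hcs]
        cases s' with
        | nil => exfalso; have := hp'.length_eq; simp_all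
        | cons b t =>
          have hne : h' ≠ [] := by
            intro hh; rw [hh] at hp'; exact absurd hp'.symm.eq_nil (by simp)
          obtain ⟨m, hm⟩ : ∃ m, PySem.List.min? h' (fun x => x) = some m := by
            cases hq : PySem.List.min? h' (fun x => x) with
            | none => exact absurd ((PySem.List.min?_eq_none_iff _ _).mp hq) hne
            | some m => exact ⟨m, rfl⟩
          have hhm : heapifyM h' = m :: h'.erase m := by simp [heapifyM, hm]
          have hmb : m = b := by
            refine front_eq_of_perm m b (h'.erase m) t
              (((List.perm_cons_erase (PySem.List.min?_mem hm)).symm).trans hp') ?_ ?_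
            · intro y hy
              rcases List.mem_cons.mp hy with h1 | h1
              · omega
              · exact PySem.List.min?_isMin hm y (List.mem_of_mem_erase h1)
            · have hbt := (List.pairwise_cons.mp (List.pairwise_cons.mp hsort).2).1
              intro y hy
              rcases List.mem_cons.mp hy with h1 | h1
              · omega
              · exact hbt y h1
          have hkey : (heappush (x + 2 * m) (heapifyM (h'.erase m))).Perm
              (insertSorted (x + 2 * b) t) := by
            subst hmb
            refine ((heappush_perm _ _).trans ?_).trans (insertSorted_perm _ _).symm
            refine List.Perm.cons _ ((heapifyM_perm _).trans ?_)
            have := hp'.erase m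
            simpa using this
          have hlen2 : (heappush (x + 2 * m) (heapifyM (h'.erase m))).length = k := by
            have h1 : (h'.erase m).length = h'.length - 1 :=
              List.length_erase_of_mem (PySem.List.min?_mem hm)
            have h2 : h'.length = k := by simpa using hn
            have h4 : 1 ≤ h'.length := List.length_pos_iff.mpr hne
            rw [heappush_length, heapifyM_length, h1]
            omega
          have hA : MinAtFront (heappush (x + 2 * m) (heapifyM (h'.erase m))) :=
            heappush_minAtFront _ _ (heapifyM_minAtFront _)
          have hB : (insertSorted (x + 2 * b) t).Pairwise (· ≤ ·) :=
            insertSorted_sorted _ _ (List.pairwise_cons.mp (List.pairwise_cons.mp hsort).2).2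
          simp only [heappop_cons, hhm]
          exact ih K _ _ (ans + 1) hlen2 hkey hA hB
      · have hcs : ¬ (1 < (x :: s').length ∧ (PySem.List.pyGet? (x :: s') 0).getD 0 < K) := by
          simpa [PySem.List.pyGet?_zero_cons, hp'.length_eq] using hc
        rw [dif_neg hc, dif_neg hcs]
        simp

-- ===== VERDICT (by name: the statement is the Claim_ definition above) =====
theorem solution_spec : Claim_equal_solution := by
  intro scoville K _ _
  unfold Spec_solution solution solution_alt
  refine loop_eq scoville.length K _ _ 0 (heapifyM_length _) ?_ (heapifyM_minAtFront _) ?_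
  · exact (heapifyM_perm _).trans (PySem.List.sorted_perm _ _ _).symm
  · simpa using PySem.List.sorted_pairwise scoville (fun x : Int => x)
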